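-- pv_equiv track=rewrite | github.com/qihang-zhang/slides-template | preprocess_math.py | _consume_math
-- ===== SOURCE A (Python) =====
-- def _is_escaped(text: str, index: int) -> bool:
--     backslashes = 0
--     index -= 1
--     while index >= 0 and text[index] == "\\":
--         backslashes += 1
--         index -= 1
--     return backslashes % 2 == 1
--
-- def _escape_underscores(math: str) -> str:
--     escaped: list[str] = []
--     index = 0
--     while index < len(math):
--         char = math[index]
--         if char == "\\":
--             escaped.append(char)
--             index += 1
--             if index < len(math):
--                 escaped.append(math[index])
--                 index += 1
--             continue
--         if char == "_":
--             escaped.append(r"\_")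
--         else:
--             escaped.append(char)
--         index += 1
--     return "".join(escaped)
--
-- def _consume_math(markdown: str, start: int) -> tuple[str, int] | None:
--     delimiters = (
--         ("$$", "$$"),
--         (r"\[", r"\]"),
--         (r"\(", r"\)"),
--         ("$", "$"),
--     )
--     for opening, closing in delimiters:
--         if not markdown.startswith(opening, start):
--             continue
--         if opening.startswith("$") and _is_escaped(markdown, start):
--             return None
--         if opening == "$" and markdown.startswith("$$", start):
--             continue
--         index = start + len(opening)
--         while index < len(markdown):
--             if markdown.startswith(closing, index) and not _is_escaped(markdown, index):
--                 inner = markdown[start + len(opening) : index]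
--                 return opening + _escape_underscores(inner) + closing, index + len(closing)
--             index += 1
--         return None
--     return None
-- ===== SOURCE B (Python) =====
-- _DELIMITERS = (
--     ("$$", "$$"),
--     ("\\[", "\\]"),
--     ("\\(", "\\)"),
--     ("$", "$"),
-- )
--
--
-- def _odd_backslash_run(markdown: str, start: int) -> bool:
--     before = markdown[:start]
--     run = len(before) - len(before.rstrip("\\"))
--     return run % 2 == 1
--
--
-- def _consume_math(markdown: str, start: int) -> "tuple[str, int] | None":
--     match = next(
--         ((o, c) for o, c in _DELIMITERS if markdown.startswith(o, start)), None
--     )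
--     if match is None:
--         return None
--     opening, closing = match
--     if opening[0] == "$" and _odd_backslash_run(markdown, start):
--         return None
--     out = [opening]
--     escaped = False
--     index = start + len(opening)
--     while index < len(markdown):
--         char = markdown[index]
--         if escaped:
--             out.append(char)
--             escaped = False
--         elif markdown.startswith(closing, index):
--             out.append(closing)
--             return "".join(out), index + len(closing)
--         elif char == "\\":
--             out.append(char)
--             escaped = True
--         elif char == "_":
--             out.append("\\_")
--         else:
--             out.append(char)
--         index += 1
--     return None
-- ===== Notes on version B (the rewrite author's own statement) =====
-- stated objective: alternative
-- what changed: B picks the first matching delimiter with a find-first instead of a loop with continue/skip branches, and replaces A's per-index backward _is_escaped rescans plus the separate _escape_underscores pass by a single forward scan that carries an escape flag, finds the unescaped closing delimiter and escapes underscores in the same pass.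
-- outside the precondition, e.g. on _consume_math('$', -10): A returns ('$$', -8), B raises IndexError; on _consume_math('$$', -3): A returns ('$$$$', 2), B returns ('$$$$$', 2)
import Mathlib
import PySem

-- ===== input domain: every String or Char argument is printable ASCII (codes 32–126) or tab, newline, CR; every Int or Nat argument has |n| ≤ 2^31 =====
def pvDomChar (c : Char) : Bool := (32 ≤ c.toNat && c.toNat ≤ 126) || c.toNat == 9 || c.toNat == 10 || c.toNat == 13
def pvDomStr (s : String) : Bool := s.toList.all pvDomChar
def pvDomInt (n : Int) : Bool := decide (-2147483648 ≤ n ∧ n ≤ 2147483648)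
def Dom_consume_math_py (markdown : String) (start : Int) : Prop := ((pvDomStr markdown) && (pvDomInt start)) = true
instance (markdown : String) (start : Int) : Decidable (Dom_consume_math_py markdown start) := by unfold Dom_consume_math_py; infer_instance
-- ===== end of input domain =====

-- B replaces A's per-index backward `_is_escaped` rescans and the separate `_escape_underscores`
-- pass by ONE forward scan with an escape flag that finds the closing delimiter and escapes
-- underscores simultaneously; return values are proved equal for every start ≥ 0.

-- ===== PORT A =====
-- Python str.startswith(prefix, start) for an Int start (negative start counts from the end, clamped at 0)
def startswithFrom (text : List Char) (pre : List Char) (start : Int) : Bool :=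
  let s : Int := if start < 0 then max (text.length + start) 0 else start
  pre.isPrefixOf (text.drop s.toNat)

-- the `while index >= 0 and text[index] == "\\"` loop of _is_escaped
def isEscapedLoop (text : List Char) (backslashes : Nat) (index : Int) : Nat :=
  if h : 0 ≤ index ∧ PySem.List.pyGet? text index = some '\\' then
    isEscapedLoop text (backslashes + 1) (index - 1)
  else backslashes
termination_by (index + 1).toNat
decreasing_by omega

def isEscapedA (text : List Char) (index : Int) : Bool :=
  isEscapedLoop text 0 (index - 1) % 2 == 1

-- the while loop of _escape_underscores (the `escaped` list accumulator, joined at the end)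
def escUndLoop (math : List Char) (escaped : List Char) (index : Nat) : List Char :=
  if h : index < math.length then
    let char := math[index]
    if char = '\\' then
      let index2 := index + 1
      if h2 : index2 < math.length then
        escUndLoop math (escaped ++ [char, math[index2]]) (index2 + 1)
      else
        escUndLoop math (escaped ++ [char]) index2
    else if char = '_' then
      escUndLoop math (escaped ++ ['\\', '_']) (index + 1)
    else
      escUndLoop math (escaped ++ [char]) (index + 1)
  else escaped
termination_by math.length - index

-- the inner `while index < len(markdown)` loop of _consume_math
def innerLoopA (md : List Char) (innerStart : Int) (opening closing : List Char) (index : Int) :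
    Option (List Char × Int) :=
  if h : index < (md.length : Int) then
    if startswithFrom md closing index = true ∧ isEscapedA md index = false then
      let inner := PySem.List.slice md (some innerStart) (some index)
      some (opening ++ escUndLoop inner [] 0 ++ closing, index + (closing.length : Int))
    else innerLoopA md innerStart opening closing (index + 1)
  else none
termination_by (md.length - index).toNat
decreasing_by omega

def pvDelims : List (List Char × List Char) :=
  [(['$','$'], ['$','$']), (['\\','['], ['\\',']']), (['\\','('], ['\\',')']), (['$'], ['$'])]

-- the `for opening, closing in delimiters` loop of _consume_math
def consumeLoopA (md : List Char) (start : Int) : List (List Char × List Char) → Option (List Char × Int)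
  | [] => none
  | (opening, closing) :: rest =>
    if startswithFrom md opening start = false then consumeLoopA md start rest
    else if PySem.Chars.startswith opening ['$'] = true ∧ isEscapedA md start = true then none
    else if opening = ['$'] ∧ startswithFrom md ['$','$'] start = true then consumeLoopA md start rest
    else innerLoopA md (start + (opening.length : Int)) opening closing (start + (opening.length : Int))

def consume_math_py (markdown : String) (start : Int) : Option (String × Int) :=
  (consumeLoopA markdown.toList start pvDelims).map (fun p => (String.ofList p.1, p.2))

-- ===== PORT B =====
-- _odd_backslash_run: parity of the backslash run at the end of markdown[:start]
def oddRunB (md : List Char) (start : Int) : Bool :=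
  let before := PySem.List.slice md none (some start)
  let run := (before.reverse.takeWhile (fun c => c = '\\')).length
  run % 2 == 1

-- B's single forward scan: escape flag + closing search + underscore escaping at once
def scanB (md : List Char) (closing : List Char) (out : List Char) (escaped : Bool) (index : Nat) :
    Option (List Char × Int) :=
  if h : index < md.length then
    let char := md[index]
    if escaped then scanB md closing (out ++ [char]) false (index + 1)
    else if closing.isPrefixOf (md.drop index) then
      some (out ++ closing, (index : Int) + (closing.length : Int))
    else if char = '\\' then scanB md closing (out ++ [char]) true (index + 1)
    else if char = '_' then scanB md closing (out ++ ['\\', '_']) false (index + 1)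
    else scanB md closing (out ++ [char]) false (index + 1)
  else none
termination_by md.length - index

def consume_math_py_alt (markdown : String) (start : Int) : Option (String × Int) :=
  match pvDelims.find? (fun oc => startswithFrom markdown.toList oc.1 start) with
  | none => none
  | some (opening, closing) =>
    if opening.head? = some '$' ∧ oddRunB markdown.toList start = true then none
    else
      (scanB markdown.toList closing opening false (start + (opening.length : Int)).toNat).map
        (fun p => (String.ofList p.1, p.2))

-- ===== PRECONDITION & SPEC =====
-- Pre_ excludes negative `start` (outside the parser's natural domain of valid string indices):
-- there A's value arises from Python's negative-index wraparound in startswith/slicing, an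
-- accident of the implementation, and B's forward scan may raise IndexError or differ.
def Pre_consume_math_py (markdown : String) (start : Int) : Prop := 0 ≤ start
instance (markdown : String) (start : Int) : Decidable (Pre_consume_math_py markdown start) := by
  unfold Pre_consume_math_py; infer_instance

def pvWitness_consume_math_py : String × Int := ("$x_y$", 0)

def Spec_consume_math_py (markdown : String) (start : Int) (out : Option (String × Int)) : Prop :=
  out = consume_math_py_alt markdown start
instance (markdown : String) (start : Int) (out : Option (String × Int)) :
    Decidable (Spec_consume_math_py markdown start out) := by
  unfold Spec_consume_math_py; infer_instance

-- ===== CLAIM (what is proved, stated in full; the proofs are below) =====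
def Claim_equal_consume_math_py : Prop :=
  ∀ (markdown : String) (start : Int), Dom_consume_math_py markdown start →
    Pre_consume_math_py markdown start →
    Spec_consume_math_py markdown start (consume_math_py markdown start)

-- ===== LEMMAS AND PROOFS =====

theorem loop_add_fuel (fuel : Nat) (text : List Char) (bs : Nat) (i : Int)
    (hf : (i + 1).toNat ≤ fuel) :
    isEscapedLoop text bs i = bs + isEscapedLoop text 0 i := by
  induction fuel generalizing bs i with
  | zero =>
    have h : ¬ (0 ≤ i ∧ PySem.List.pyGet? text i = some '\\') := by
      intro hh; omega
    rw [isEscapedLoop, dif_neg h]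
    conv_rhs => rw [isEscapedLoop, dif_neg h]
    omega
  | succ n ih =>
    by_cases h : 0 ≤ i ∧ PySem.List.pyGet? text i = some '\\'
    · rw [isEscapedLoop, dif_pos h, ih (bs + 1) (i - 1) (by omega)]
      conv_rhs => rw [isEscapedLoop, dif_pos h, ih 1 (i - 1) (by omega)]
      omega
    · rw [isEscapedLoop, dif_neg h]
      conv_rhs => rw [isEscapedLoop, dif_neg h]
      omega

theorem loop_add (text : List Char) (bs : Nat) (i : Int) :
    isEscapedLoop text bs i = bs + isEscapedLoop text 0 i :=
  loop_add_fuel (i + 1).toNat text bs i le_rfl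

theorem loop_step (md : List Char) (j : Nat) (h : j < md.length) :
    isEscapedLoop md 0 (j : Int) =
      if md[j] = '\\' then isEscapedLoop md 0 ((j : Int) - 1) + 1 else 0 := by
  have hg : PySem.List.pyGet? md (j : Int) = some md[j] := by simp [h]
  by_cases hc : md[j] = '\\'
  · rw [isEscapedLoop, dif_pos ⟨by omega, by rw [hg, hc]⟩, loop_add, if_pos hc]
    omega
  · rw [isEscapedLoop, dif_neg (by rw [hg]; rintro ⟨-, hx⟩; exact hc (by simpa using hx)), if_neg hc]

theorem runR (md : List Char) (s : Nat) (hs : s ≤ md.length) :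
    isEscapedLoop md 0 ((s : Int) - 1) =
      ((md.take s).reverse.takeWhile (fun c => c = '\\')).length := by
  induction s with
  | zero =>
    rw [isEscapedLoop]
    simp
  | succ n ih =>
    have hn : n < md.length := by
      omega
    have htake : md.take (n + 1) = md.take n ++ [md[n]] := by
      rw [List.take_add_one]
      simp [hn]
    rw [show ((n + 1 : Nat) : Int) - 1 = (n : Int) by push_cast; ring]
    rw [loop_step md n hn, htake, List.reverse_append]
    by_cases hc : md[n] = '\\'
    · simp [hc, ih (by omega)]
    · simp [hc]

theorem isEscapedA_succ (md : List Char) (j : Nat) (h : j < md.length) :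
    isEscapedA md ((j : Int) + 1) = (decide (md[j] = '\\') && !(isEscapedA md (j : Int))) := by
  unfold isEscapedA
  rw [show (j : Int) + 1 - 1 = (j : Int) by ring, loop_step md j h]
  by_cases hc : md[j] = '\\'
  · rw [if_pos hc]
    simp only [hc, decide_true, Bool.true_and]
    rcases Nat.mod_two_eq_zero_or_one (isEscapedLoop md 0 ((j : Int) - 1)) with h0 | h0 <;>
      rw [Nat.add_mod, h0] <;> simp
  · rw [if_neg hc]
    simp [hc]

theorem E0 (md : List Char) (s : Nat) (hs : s ≤ md.length) :
    oddRunB md (s : Int) = isEscapedA md (s : Int) := by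
  unfold oddRunB isEscapedA
  rw [PySem.List.slice_to_natCast, runR md s hs]

-- isEscapedA is false right after a character that is not a backslash
theorem esc_after_nonbs (md : List Char) (j : Nat) (h : j < md.length) (hc : md[j] ≠ '\\') :
    isEscapedA md ((j : Int) + 1) = false := by
  rw [isEscapedA_succ md j h]
  simp [hc]

-- forward escape-flag transform (proof device): what _escape_underscores computes, char by char
def escF : List Char → Bool → List Char
  | [], _ => []
  | c :: rest, true => c :: escF rest false
  | c :: rest, false =>
    if c = '\\' then c :: escF rest true
    else if c = '_' then '\\' :: '_' :: escF rest false
    else c :: escF rest false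

theorem escUnd_eq_fuel (fuel : Nat) (math : List Char) (acc : List Char) (index : Nat)
    (hf : math.length - index ≤ fuel) :
    escUndLoop math acc index = acc ++ escF (math.drop index) false := by
  induction fuel generalizing acc index with
  | zero =>
    rw [escUndLoop, dif_neg (by omega)]
    rw [List.drop_eq_nil_of_le (by omega), escF]
    simp
  | succ n ih =>
    by_cases h : index < math.length
    · have hdrop : math.drop index = math[index] :: math.drop (index + 1) :=
        (List.getElem_cons_drop h).symm
      rw [escUndLoop, dif_pos h]
      by_cases hc : math[index] = '\\'
      · rw [if_pos hc]
        by_cases h2 : index + 1 < math.length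
        · have hdrop2 : math.drop (index + 1) = math[index + 1] :: math.drop (index + 2) :=
            (List.getElem_cons_drop h2).symm
          rw [dif_pos h2, ih _ _ (by omega), hdrop, hdrop2, escF, if_pos hc, escF]
          simp
        · rw [dif_neg h2, ih _ _ (by omega), hdrop]
          rw [List.drop_eq_nil_of_le (by omega)]
          simp [escF, hc]
      · rw [if_neg hc]
        by_cases hu : math[index] = '_'
        · rw [if_pos hu, ih _ _ (by omega), hdrop, escF, if_neg hc, if_pos hu]
          simp
        · rw [if_neg hu, ih _ _ (by omega), hdrop, escF, if_neg hc, if_neg hu]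
          simp
    · rw [escUndLoop, dif_neg h]
      rw [List.drop_eq_nil_of_le (by omega), escF]
      simp

theorem escUnd_eq (math : List Char) :
    escUndLoop math [] 0 = escF math false := by
  have := escUnd_eq_fuel math.length math [] 0 (by omega)
  simpa using this

theorem sw_nat (md p : List Char) (j : Nat) :
    startswithFrom md p (j : Int) = p.isPrefixOf (md.drop j) := by
  unfold startswithFrom
  rw [if_neg (by omega)]
  simp

theorem extract_snoc (md : List Char) (is j : Nat) (h1 : is ≤ j) (h2 : j < md.length) :
    (md.drop is).take (j + 1 - is) = (md.drop is).take (j - is) ++ [md[j]] := by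
  have hk : j + 1 - is = (j - is) + 1 := by omega
  have hlt : j - is < (md.drop is).length := by rw [List.length_drop]; omega
  have hidx : is + (j - is) = j := by omega
  rw [hk, List.take_add_one]
  simp only [hlt, List.getElem?_eq_getElem, Option.toList_some]
  simp [List.getElem_drop, hidx]

theorem scan_inv (md : List Char) (opening closing : List Char) (is : Nat) (fuel : Nat) :
    ∀ (j : Nat) (esc : Bool) (pre : List Char),
    md.length - j ≤ fuel → is ≤ j →
    isEscapedA md (j : Int) = esc →
    (∀ tail, escF ((md.drop is).take (j - is) ++ tail) false = pre ++ escF tail esc) →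
    innerLoopA md (is : Int) opening closing (j : Int) = scanB md closing (opening ++ pre) esc j := by
  induction fuel with
  | zero =>
    intro j esc pre hf hij hesc hpre
    rw [innerLoopA, dif_neg (by omega), scanB, dif_neg (by omega)]
  | succ n ih =>
    intro j esc pre hf hij hesc hpre
    by_cases h : j < md.length
    · have hsnoc := extract_snoc md is j hij h
      have hsucc : isEscapedA md ((j : Int) + 1) = (decide (md[j] = '\\') && !esc) := by
        rw [isEscapedA_succ md j h, hesc]
      have hcast : ((j + 1 : Nat) : Int) = (j : Int) + 1 := by push_cast; ring
      rw [innerLoopA, dif_pos (by omega), scanB, dif_pos h]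
      cases esc with
      | true =>
        rw [if_pos rfl]
        rw [if_neg (by rw [hesc]; simp)]
        rw [show (j : Int) + 1 = ((j + 1 : Nat) : Int) by push_cast; ring]
        rw [List.append_assoc opening pre [md[j]]] at *
        exact ih (j + 1) false (pre ++ [md[j]]) (by omega) (by omega)
          (by rw [hcast, hsucc]; simp)
          (by intro tail
              rw [hsnoc, List.append_assoc, List.singleton_append,
                hpre (md[j] :: tail), escF]
              simp)
      | false =>
        rw [if_neg (show ¬(false = true) by simp)]
        by_cases hm : closing.isPrefixOf (md.drop j)
        · rw [if_pos hm, if_pos ⟨by rw [sw_nat]; exact hm, hesc⟩]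
          have hslice : PySem.List.slice md (some (is : Int)) (some (j : Int)) =
              (md.drop is).take (j - is) := by
            rw [PySem.List.slice_natCast]
          rw [hslice]
          simp only [escUnd_eq]
          have : escF ((md.drop is).take (j - is)) false = pre := by
            have := hpre []
            rw [escF] at this
            simpa using this
          rw [this]
        · rw [if_neg hm, if_neg (by rw [sw_nat]; rintro ⟨h1, -⟩; exact hm h1)]
          rw [show (j : Int) + 1 = ((j + 1 : Nat) : Int) by push_cast; ring]
          by_cases hc : md[j] = '\\'
          · rw [if_pos hc]
            rw [List.append_assoc opening pre [md[j]]]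
            exact ih (j + 1) true (pre ++ [md[j]]) (by omega) (by omega)
              (by rw [hcast, hsucc, hc]; simp)
              (by intro tail
                  rw [hsnoc, List.append_assoc, List.singleton_append,
                    hpre (md[j] :: tail), escF, if_pos hc]
                  simp)
          · rw [if_neg hc]
            by_cases hu : md[j] = '_'
            · rw [if_pos hu]
              rw [List.append_assoc opening pre ['\\', '_']]
              exact ih (j + 1) false (pre ++ ['\\', '_']) (by omega) (by omega)
                (by rw [hcast, hsucc]; simp [hc])
                (by intro tail
                    rw [hsnoc, List.append_assoc, List.singleton_append,
                      hpre (md[j] :: tail), escF, if_neg hc, if_pos hu]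
                    simp)
            · rw [if_neg hu]
              rw [List.append_assoc opening pre [md[j]]]
              exact ih (j + 1) false (pre ++ [md[j]]) (by omega) (by omega)
                (by rw [hcast, hsucc]; simp [hc])
                (by intro tail
                    rw [hsnoc, List.append_assoc, List.singleton_append,
                      hpre (md[j] :: tail), escF, if_neg hc, if_neg hu]
                    simp)
    · rw [innerLoopA, dif_neg (by omega), scanB, dif_neg (by omega)]

theorem esc_at_inner (md : List Char) (s : Nat) (opening : List Char)
    (hpre : opening.isPrefixOf (md.drop s) = true) (hne : opening ≠ [])
    (hl : opening.getLast hne ≠ '\\') :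
    isEscapedA md ((s + opening.length : Nat) : Int) = false := by
  obtain ⟨t, ht⟩ := List.isPrefixOf_iff_prefix.mp hpre
  have hlen : opening.length + t.length = md.length - s := by
    have := congrArg List.length ht
    simpa using this
  have hop : 0 < opening.length := List.length_pos_of_ne_nil hne
  have hslen : s < md.length := by
    by_contra hh
    have : md.drop s = [] := List.drop_eq_nil_of_le (by omega)
    rw [this] at ht
    have := congrArg List.length ht
    simp at this
    omega
  have hk : opening.length - 1 < opening.length := by omega
  have hj : s + (opening.length - 1) < md.length := by omega
  have hmd : md[s + (opening.length - 1)]'hj = opening[opening.length - 1]'hk := by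
    have h1 : (md.drop s)[opening.length - 1]'(by rw [List.length_drop]; omega) =
        md[s + (opening.length - 1)]'hj := by
      rw [List.getElem_drop]
    rw [← h1]
    have h2 : (md.drop s) = opening ++ t := ht.symm
    simp only [h2]
    rw [List.getElem_append_left hk]
  have hnb : md[s + (opening.length - 1)]'hj ≠ '\\' := by
    rw [hmd, ← List.getLast_eq_getElem]
    exact hl
  have hcast : ((s + opening.length : Nat) : Int) = ((s + (opening.length - 1) : Nat) : Int) + 1 := by
    omega
  rw [hcast]
  exact esc_after_nonbs md (s + (opening.length - 1)) hj hnb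

theorem main_branch (md : List Char) (s : Nat) (opening closing : List Char)
    (hmatch : opening.isPrefixOf (md.drop s) = true) (hne : opening ≠ [])
    (hl : opening.getLast hne ≠ '\\') :
    innerLoopA md ((s : Int) + (opening.length : Int)) opening closing
        ((s : Int) + (opening.length : Int)) =
      scanB md closing opening false ((s : Int) + (opening.length : Int)).toNat := by
  have hcast : (s : Int) + (opening.length : Int) = ((s + opening.length : Nat) : Int) := by
    push_cast; ring
  rw [hcast, show ((s + opening.length : Nat) : Int).toNat = s + opening.length by omega]
  have hesc := esc_at_inner md s opening hmatch hne hl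
  have hinv := scan_inv md opening closing (s + opening.length) md.length (s + opening.length)
    false [] (by omega) le_rfl hesc (by intro tail; simp)
  simpa using hinv

theorem match_lt (md p : List Char) (s : Nat) (h : p.isPrefixOf (md.drop s) = true)
    (hne : p ≠ []) : s < md.length := by
  obtain ⟨t, ht⟩ := List.isPrefixOf_iff_prefix.mp h
  have hlen := congrArg List.length ht
  simp at hlen
  have hop : 0 < p.length := List.length_pos_of_ne_nil hne
  by_contra hh
  omega

theorem top_eq (markdown : String) (s : Nat) :
    consume_math_py markdown (s : Int) = consume_math_py_alt markdown (s : Int) := by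
  unfold consume_math_py consume_math_py_alt
  simp only [pvDelims]
  set md := markdown.toList with hmd
  simp only [consumeLoopA]
  by_cases d1 : startswithFrom md ['$','$'] (s : Int) = true
  · rw [List.find?_cons_of_pos (by simpa using d1),
      if_neg (show ¬(startswithFrom md ['$','$'] (s : Int) = false) by simp [d1])]
    have hmatch : (['$','$'] : List Char).isPrefixOf (md.drop s) = true := by
      rw [← sw_nat]; exact d1
    have hslt : s < md.length := match_lt md _ s hmatch (by simp)
    have hE := E0 md s (by omega)
    by_cases hesc : isEscapedA md (s : Int) = true
    · rw [if_pos (show PySem.Chars.startswith ['$','$'] ['$'] = true ∧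
          isEscapedA md (s : Int) = true from ⟨by decide, hesc⟩)]
      simp [hE, hesc]
    · rw [if_neg (show ¬(PySem.Chars.startswith ['$','$'] ['$'] = true ∧
          isEscapedA md (s : Int) = true) from fun hh => hesc hh.2),
        if_neg (show ¬((['$','$'] : List Char) = ['$'] ∧
          startswithFrom md ['$','$'] (s : Int) = true) by simp),
        main_branch md s ['$','$'] ['$','$'] hmatch (by simp) (by decide)]
      simp [hE, hesc]
  · rw [List.find?_cons_of_neg (by simpa using d1),
      if_pos (show startswithFrom md ['$','$'] (s : Int) = false by
        revert d1; cases startswithFrom md ['$','$'] (s : Int) <;> simp)]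
    by_cases d2 : startswithFrom md ['\\','['] (s : Int) = true
    · rw [List.find?_cons_of_pos (by simpa using d2),
        if_neg (show ¬(startswithFrom md ['\\','['] (s : Int) = false) by simp [d2])]
      have hmatch : (['\\','['] : List Char).isPrefixOf (md.drop s) = true := by
        rw [← sw_nat]; exact d2
      rw [if_neg (show ¬(PySem.Chars.startswith ['\\','['] ['$'] = true ∧
            isEscapedA md (s : Int) = true) from fun hh => absurd hh.1 (by decide)),
        if_neg (show ¬((['\\','['] : List Char) = ['$'] ∧
          startswithFrom md ['$','$'] (s : Int) = true) by simp),
        main_branch md s ['\\','['] ['\\',']'] hmatch (by simp) (by decide)]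
      simp
    · rw [List.find?_cons_of_neg (by simpa using d2),
        if_pos (show startswithFrom md ['\\','['] (s : Int) = false by
          revert d2; cases startswithFrom md ['\\','['] (s : Int) <;> simp)]
      by_cases d3 : startswithFrom md ['\\','('] (s : Int) = true
      · rw [List.find?_cons_of_pos (by simpa using d3),
          if_neg (show ¬(startswithFrom md ['\\','('] (s : Int) = false) by simp [d3])]
        have hmatch : (['\\','('] : List Char).isPrefixOf (md.drop s) = true := by
          rw [← sw_nat]; exact d3
        rw [if_neg (show ¬(PySem.Chars.startswith ['\\','('] ['$'] = true ∧
              isEscapedA md (s : Int) = true) from fun hh => absurd hh.1 (by decide)),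
          if_neg (show ¬((['\\','('] : List Char) = ['$'] ∧
            startswithFrom md ['$','$'] (s : Int) = true) by simp),
          main_branch md s ['\\','('] ['\\',')'] hmatch (by simp) (by decide)]
        simp
      · rw [List.find?_cons_of_neg (by simpa using d3),
          if_pos (show startswithFrom md ['\\','('] (s : Int) = false by
            revert d3; cases startswithFrom md ['\\','('] (s : Int) <;> simp)]
        by_cases d4 : startswithFrom md ['$'] (s : Int) = true
        · rw [List.find?_cons_of_pos (by simpa using d4),
            if_neg (show ¬(startswithFrom md ['$'] (s : Int) = false) by simp [d4])]
          have hmatch : (['$'] : List Char).isPrefixOf (md.drop s) = true := by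
            rw [← sw_nat]; exact d4
          have hslt : s < md.length := match_lt md _ s hmatch (by simp)
          have hE := E0 md s (by omega)
          by_cases hesc : isEscapedA md (s : Int) = true
          · rw [if_pos (show PySem.Chars.startswith ['$'] ['$'] = true ∧
                isEscapedA md (s : Int) = true from ⟨by decide, hesc⟩)]
            simp [hE, hesc]
          · rw [if_neg (show ¬(PySem.Chars.startswith ['$'] ['$'] = true ∧
                isEscapedA md (s : Int) = true) from fun hh => hesc hh.2),
              if_neg (show ¬(True ∧
                startswithFrom md ['$','$'] (s : Int) = true) from fun hh => d1 hh.2),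
              main_branch md s ['$'] ['$'] hmatch (by simp) (by decide)]
            simp [hE, hesc]
        · rw [List.find?_cons_of_neg (by simpa using d4),
            if_pos (show startswithFrom md ['$'] (s : Int) = false by
              revert d4; cases startswithFrom md ['$'] (s : Int) <;> simp)]
          simp [List.find?]

-- ===== VERDICT (by name: the statement is the Claim_ definition above) =====
theorem consume_math_py_spec : Claim_equal_consume_math_py := by
  intro markdown start hdom hpre
  unfold Spec_consume_math_py
  lift start to ℕ using hpre with s
  exact top_eq markdown s
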